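-- pv_equiv track=rewrite | github.com/Fiachra-Knox/grid-nearest-neighbours | utils.py | sparse_grid_diagonals
-- ===== SOURCE A (Python) =====
-- from collections import defaultdict
--
-- def sparse_grid_diagonals(dense_grid, ascending=False):
--   # Turns a grid into a dictionary (with default value []);
--   # keys are k such that the diagonal x + y = k is nonempty
--   # Values are lists of coordinates and values of non-null entries.
--   sparse_diagonals = defaultdict(list)
--   if ascending:
--     off = len(dense_grid) - 1
--     f = lambda i, j: i - j
--   else:
--     f = lambda i, j: i + j
--   for j, row in enumerate(dense_grid):
--     for i, x in enumerate(row):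
--       if x is not None:
--         sparse_diagonals[f(i, j)].append((i, j, x))
--   if not ascending:
--     for key in sparse_diagonals:
--       sparse_diagonals[key].reverse()
--   return sparse_diagonals
-- ===== SOURCE B (Python) =====
-- from collections import defaultdict
--
-- def sparse_grid_diagonals(dense_grid, ascending=False):
--     # Gather all non-null cells once, then build each diagonal directly:
--     # for every distinct diagonal key (in first-appearance order), collect
--     # its cells sorted by column i. (Per diagonal, i determines j, and the
--     # wanted order is increasing i in both directions.)
--     f = (lambda i, j: i - j) if ascending else (lambda i, j: i + j)
--     cells = [(i, j, x)
--              for j, row in enumerate(dense_grid)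
--              for i, x in enumerate(row)
--              if x is not None]
--     sd = defaultdict(list)
--     for k in dict.fromkeys(f(i, j) for i, j, x in cells):
--         sd[k] = sorted((c for c in cells if f(c[0], c[1]) == k), key=lambda c: c[0])
--     return sd
-- ===== Notes on version B (the rewrite author's own statement) =====
-- stated objective: alternative
-- what changed: Replaces A's single-pass grouping with per-list reversal by a gather-then-build shape: one comprehension collects all non-null cells, then each distinct diagonal key (in first-appearance order) gets its cells selected and sorted by column in one assignment.
import Mathlib
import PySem

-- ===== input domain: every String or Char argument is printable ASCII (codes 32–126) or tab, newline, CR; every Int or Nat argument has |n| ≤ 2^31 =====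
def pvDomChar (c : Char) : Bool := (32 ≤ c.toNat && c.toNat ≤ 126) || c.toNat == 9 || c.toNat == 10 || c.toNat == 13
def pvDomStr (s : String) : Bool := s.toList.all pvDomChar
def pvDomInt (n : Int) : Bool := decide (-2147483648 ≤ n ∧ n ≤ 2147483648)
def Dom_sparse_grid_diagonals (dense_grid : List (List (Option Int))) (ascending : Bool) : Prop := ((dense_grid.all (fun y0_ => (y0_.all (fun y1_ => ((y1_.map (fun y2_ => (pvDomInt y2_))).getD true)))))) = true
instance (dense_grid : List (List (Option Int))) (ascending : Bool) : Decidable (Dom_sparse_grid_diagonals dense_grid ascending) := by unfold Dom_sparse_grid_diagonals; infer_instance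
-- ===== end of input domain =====

-- B replaces A's group-while-scanning-then-reverse-each-list shape by an alternative decomposition:
-- gather all non-null cells once, then build each diagonal's list directly (its cells sorted by column).

-- ===== PORT A =====
-- (A's `off` variable in the ascending branch is dead code and has no porting target.)
def sparse_grid_diagonals (dense_grid : List (List (Option Int))) (ascending : Bool) : List (Int × List (Int × Int × Int)) :=
  let f : Int → Int → Int := if ascending then fun i j => i - j else fun i j => i + j
  let sd : PySem.Dict Int (List (Int × Int × Int)) :=
    (PySem.List.enumerate dense_grid).foldl (fun d jr =>
      (PySem.List.enumerate jr.2).foldl (fun d ix =>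
        match ix.2 with
        | some x => d.modify (f ix.1 jr.1) [] (fun l => l ++ [(ix.1, jr.1, x)])
        | none => d) d) PySem.Dict.empty
  let sd2 : PySem.Dict Int (List (Int × Int × Int)) :=
    if ascending then sd
    else sd.keys.foldl (fun d k => d.modify k [] (fun l => l.reverse)) sd
  sd2.items

-- ===== PORT B =====
def sparse_grid_diagonals_alt (dense_grid : List (List (Option Int))) (ascending : Bool) : List (Int × List (Int × Int × Int)) :=
  let f : Int → Int → Int := if ascending then fun i j => i - j else fun i j => i + j
  let cells : List (Int × Int × Int) :=
    (PySem.List.enumerate dense_grid).flatMap (fun jr =>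
      (PySem.List.enumerate jr.2).filterMap (fun ix => ix.2.map (fun v => (ix.1, jr.1, v))))
  let sd : PySem.Dict Int (List (Int × Int × Int)) :=
    (PySem.List.dedup (cells.map (fun c => f c.1 c.2.1))).foldl
      (fun d k => d.insert k (PySem.List.sorted (cells.filter (fun c => f c.1 c.2.1 == k)) (fun c => c.1)))
      PySem.Dict.empty
  sd.items

-- ===== PRECONDITION & SPEC =====
def Spec_sparse_grid_diagonals (dense_grid : List (List (Option Int))) (ascending : Bool) (out : List (Int × List (Int × Int × Int))) : Prop := out = sparse_grid_diagonals_alt dense_grid ascending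
instance (dense_grid : List (List (Option Int))) (ascending : Bool) (out : List (Int × List (Int × Int × Int))) : Decidable (Spec_sparse_grid_diagonals dense_grid ascending out) := by unfold Spec_sparse_grid_diagonals; infer_instance

-- ===== CLAIM (what is proved, stated in full; the proofs are below) =====
def Claim_equal_sparse_grid_diagonals : Prop := ∀ (dense_grid : List (List (Option Int))) (ascending : Bool), Dom_sparse_grid_diagonals dense_grid ascending → Spec_sparse_grid_diagonals dense_grid ascending (sparse_grid_diagonals dense_grid ascending)

-- ===== LEMMAS AND PROOFS =====

-- the flat list of non-null cells (i, j, x), in A's scan order (j outer, i inner)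
def pvCells (g : List (List (Option Int))) : List (Int × Int × Int) :=
  (PySem.List.enumerate g).flatMap (fun jr =>
    (PySem.List.enumerate jr.2).filterMap (fun ix => ix.2.map (fun v => (ix.1, jr.1, v))))

def pvKey (kf : Int → Int → Int) (c : Int × Int × Int) : Int := kf c.1 c.2.1

def pvPairs (kf : Int → Int → Int) (g : List (List (Option Int))) : List (Int × (Int × Int × Int)) :=
  (pvCells g).map (fun c => (pvKey kf c, c))

-- A's dict after the grouping loop, as one fold over key/cell pairs
def pvD1 (kf : Int → Int → Int) (g : List (List (Option Int))) : PySem.Dict Int (List (Int × Int × Int)) :=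
  (pvPairs kf g).foldl (fun d p => d.modify p.1 [] (fun l => l ++ [p.2])) PySem.Dict.empty

-- A's scan order as a relation: j strictly grows, and inside a row i strictly grows
def pvLex (a b : Int × Int × Int) : Prop := a.2.1 < b.2.1 ∨ (a.2.1 = b.2.1 ∧ a.1 < b.1)

theorem pvFoldl_filterMap {α β δ : Type} (h : α → Option β) (g : δ → β → δ) :
    ∀ (l : List α) (d : δ), (l.filterMap h).foldl g d
      = l.foldl (fun d a => match h a with | some b => g d b | none => d) d := by
  intro l
  induction l with
  | nil => intro d; rfl
  | cons a t ih => intro d; cases hh : h a <;> simp [hh, ih]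

-- A's nested loop is the grouping fold over the flat cell list
theorem pvA_loop_eq (kf : Int → Int → Int) (g : List (List (Option Int))) :
    (PySem.List.enumerate g).foldl (fun d jr =>
      (PySem.List.enumerate jr.2).foldl (fun d ix =>
        match ix.2 with
        | some x => d.modify (kf ix.1 jr.1) [] (fun l => l ++ [(ix.1, jr.1, x)])
        | none => d) d) PySem.Dict.empty = pvD1 kf g := by
  unfold pvD1 pvPairs pvCells
  simp only [List.foldl_map, List.foldl_flatMap, pvFoldl_filterMap]
  congr 1
  funext d jr
  congr 1
  funext d ix
  cases ix.2 <;> rfl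

theorem pvD1_getD (kf : Int → Int → Int) (g : List (List (Option Int))) (k : Int) :
    (pvD1 kf g).getD k [] = (pvCells g).filter (fun c => pvKey kf c == k) := by
  unfold pvD1
  rw [PySem.Dict.getD_foldl_modify_append]
  unfold pvPairs
  simp [List.filter_map, Function.comp_def]

theorem pvD1_keys (kf : Int → Int → Int) (g : List (List (Option Int))) :
    (pvD1 kf g).keys = PySem.List.dedup ((pvCells g).map (pvKey kf)) := by
  unfold pvD1
  rw [PySem.Dict.keys_foldl_modify_key (pvPairs kf g) (fun p => p.1) [] (fun _ p l => l ++ [p.2])]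
  rw [PySem.List.dedup_eq_ofList, PySem.Set.ofList_eq_foldl]
  unfold pvPairs
  simp only [List.map_map, PySem.Dict.keys_empty]
  rfl

theorem pvD1_keys_nodup (kf : Int → Int → Int) (g : List (List (Option Int))) :
    (pvD1 kf g).keys.Nodup := by
  unfold pvD1
  exact PySem.Dict.nodup_keys_foldl_modify_key (pvPairs kf g) (fun (p : Int × (Int × Int × Int)) => p.1) [] (fun _ p l => l ++ [p.2]) PySem.Dict.empty (by rw [PySem.Dict.keys_empty]; exact List.nodup_nil)

theorem pvEnum_pairwise {α : Type} (l : List α) (s : Int) :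
    (PySem.List.enumerate l s).Pairwise (fun a b => a.1 < b.1) := by
  have h := PySem.List.pairwise_lt_pyRange_one s (s + l.length)
  rw [← PySem.List.map_fst_enumerate l s] at h
  exact List.pairwise_map.mp h

theorem pvMem_chunk {x : Int × Int × Int} {jr : Int × List (Option Int)}
    (hx : x ∈ (PySem.List.enumerate jr.2).filterMap (fun ix => ix.2.map (fun v => (ix.1, jr.1, v)))) :
    x.2.1 = jr.1 := by
  simp only [List.mem_filterMap, Option.map_eq_some_iff] at hx
  rcases hx with ⟨ix, _, v, _, rfl⟩
  rfl

theorem pvCells_pairwise (g : List (List (Option Int))) : (pvCells g).Pairwise pvLex := by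
  unfold pvCells
  rw [List.pairwise_flatMap]
  constructor
  · intro jr _
    apply List.Pairwise.filterMap _ ?_ (pvEnum_pairwise jr.2 0)
    intro a b hab x hx y hy
    simp only [Option.map_eq_some_iff] at hx hy
    rcases hx with ⟨v, _, rfl⟩
    rcases hy with ⟨w, _, rfl⟩
    exact Or.inr ⟨rfl, hab⟩
  · apply List.Pairwise.imp ?_ (pvEnum_pairwise g 0)
    intro a b hab x hx y hy
    exact Or.inl (by rw [pvMem_chunk hx, pvMem_chunk hy]; exact hab)

theorem pvSet_add_of_mem {s : PySem.Set Int} {x : Int} (h : x ∈ s) : PySem.Set.add s x = s := by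
  simp [PySem.Set.add, PySem.Set.contains, h]

theorem pvSet_update_self (s : PySem.Set Int) : ∀ (l : List Int), (∀ x ∈ l, x ∈ s) → PySem.Set.update s l = s := by
  intro l
  induction l with
  | nil => intro _; rfl
  | cons a t ih =>
    intro h
    have : PySem.Set.update s (a :: t) = PySem.Set.update (PySem.Set.add s a) t := rfl
    rw [this, pvSet_add_of_mem (h a (by simp))]
    exact ih (fun x hx => h x (by simp [hx]))

-- the reverse pass, read through getD (keys are Nodup, so each list is reversed once)
theorem pvRev_getD (l : List Int) (d : PySem.Dict Int (List (Int × Int × Int))) (hnd : l.Nodup) (k : Int) :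
    ((l.foldl (fun d k => d.modify k [] (fun v => v.reverse)) d).getD k [])
      = if k ∈ l then (d.getD k []).reverse else d.getD k [] := by
  induction l generalizing d with
  | nil => simp
  | cons a t ih =>
    simp only [List.foldl_cons]
    rw [ih _ (List.nodup_cons.mp hnd).2, PySem.Dict.getD_modify]
    by_cases hk : k = a
    · subst hk
      have : k ∉ t := (List.nodup_cons.mp hnd).1
      simp [this]
    · by_cases ht : k ∈ t <;> simp [hk, ht]

-- per descending diagonal, A's scan collects columns in decreasing order: sorting = reversing
theorem pvSorted_desc (g : List (List (Option Int))) (k : Int) :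
    PySem.List.sorted ((pvCells g).filter (fun c => pvKey (fun i j => i + j) c == k)) (fun c => c.1)
      = ((pvCells g).filter (fun c => pvKey (fun i j => i + j) c == k)).reverse := by
  apply PySem.List.sorted_eq_of_perm_of_pairwise_lt
  · exact List.reverse_perm _
  · rw [List.pairwise_reverse]
    have hF := List.Pairwise.filter (fun c => pvKey (fun i j => i + j) c == k) (pvCells_pairwise g)
    refine List.Pairwise.imp_of_mem ?_ hF
    intro a b ha hb hab
    have hka : a.1 + a.2.1 = k := by simpa [pvKey] using (List.mem_filter.mp ha).2
    have hkb : b.1 + b.2.1 = k := by simpa [pvKey] using (List.mem_filter.mp hb).2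
    rcases hab with h | ⟨h1, h2⟩ <;> omega

-- per ascending diagonal, A's scan collects columns in increasing order: sorting is the identity
theorem pvSorted_asc (g : List (List (Option Int))) (k : Int) :
    PySem.List.sorted ((pvCells g).filter (fun c => pvKey (fun i j => i - j) c == k)) (fun c => c.1)
      = (pvCells g).filter (fun c => pvKey (fun i j => i - j) c == k) := by
  apply PySem.List.sorted_eq_of_perm_of_pairwise_lt
  · exact List.Perm.refl _
  · have hF := List.Pairwise.filter (fun c => pvKey (fun i j => i - j) c == k) (pvCells_pairwise g)
    refine List.Pairwise.imp_of_mem ?_ hF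
    intro a b ha hb hab
    have hka : a.1 - a.2.1 = k := by simpa [pvKey] using (List.mem_filter.mp ha).2
    have hkb : b.1 - b.2.1 = k := by simpa [pvKey] using (List.mem_filter.mp hb).2
    rcases hab with h | ⟨h1, h2⟩ <;> omega

-- B's fold over the fresh, Nodup key list, read through items
theorem pvB_items (kf : Int → Int → Int) (g : List (List (Option Int))) :
    ((PySem.List.dedup ((pvCells g).map (fun c => pvKey kf c))).foldl
      (fun d k => d.insert k (PySem.List.sorted ((pvCells g).filter (fun c => pvKey kf c == k)) (fun c => c.1)))
      PySem.Dict.empty).items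
    = (PySem.List.dedup ((pvCells g).map (fun c => pvKey kf c))).map
        (fun k => (k, PySem.List.sorted ((pvCells g).filter (fun c => pvKey kf c == k)) (fun c => c.1))) := by
  rw [PySem.Dict.items_foldl_insert_fresh _ (fun a => a)
        (fun k => PySem.List.sorted ((pvCells g).filter (fun c => pvKey kf c == k)) (fun c => c.1))
        PySem.Dict.empty (by intro a _; exact PySem.Dict.contains_empty a)
        (by
          show (List.map (fun a => a) (PySem.List.dedup ((pvCells g).map (fun c => pvKey kf c)))).Nodup
          rw [show List.map (fun (a : Int) => a) (PySem.List.dedup ((pvCells g).map (fun c => pvKey kf c))) = PySem.List.dedup ((pvCells g).map (fun c => pvKey kf c)) from List.map_id _, PySem.List.dedup_eq_ofList]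
          exact PySem.Set.nodup_ofList _)]
  simp [PySem.Dict.empty]

-- ===== VERDICT (by name: the statement is the Claim_ definition above) =====
theorem sparse_grid_diagonals_spec : Claim_equal_sparse_grid_diagonals := by
  intro g asc _dom
  unfold Spec_sparse_grid_diagonals
  cases asc
  · -- descending: keys i + j; A reverses each diagonal, B sorts it by column
    simp only [sparse_grid_diagonals, sparse_grid_diagonals_alt, Bool.false_eq_true, if_false]
    rw [pvA_loop_eq (fun i j => i + j) g]
    show ((pvD1 (fun i j => i + j) g).keys.foldl (fun d k => d.modify k [] (fun l => l.reverse)) (pvD1 (fun i j => i + j) g)).items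
      = ((PySem.List.dedup ((pvCells g).map (fun c => pvKey (fun i j => i + j) c))).foldl
          (fun d k => d.insert k (PySem.List.sorted ((pvCells g).filter (fun c => pvKey (fun i j => i + j) c == k)) (fun c => c.1)))
          PySem.Dict.empty).items
    rw [pvB_items]
    have hnd : (pvD1 (fun i j => i + j) g).keys.Nodup := pvD1_keys_nodup _ g
    have hkeys2 : ((pvD1 (fun i j => i + j) g).keys.foldl (fun d k => d.modify k [] (fun l => l.reverse)) (pvD1 (fun i j => i + j) g)).keys
        = (pvD1 (fun i j => i + j) g).keys := by
      rw [PySem.Dict.keys_foldl_modify_key _ (fun k => k) [] (fun _ _ v => v.reverse)]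
      rw [show List.map (fun (k : Int) => k) (pvD1 (fun i j => i + j) g).keys = (pvD1 (fun i j => i + j) g).keys from List.map_id _]
      exact pvSet_update_self _ _ (fun x hx => hx)
    rw [PySem.Dict.items_eq_map_keys _ (by rw [hkeys2]; exact hnd) []]
    rw [hkeys2, show PySem.List.dedup ((pvCells g).map (fun c => pvKey (fun i j => i + j) c)) = (pvD1 (fun i j => i + j) g).keys from (pvD1_keys _ g).symm]
    apply List.map_congr_left
    intro k hk
    rw [pvRev_getD _ _ hnd k, if_pos hk, pvD1_getD, pvSorted_desc]
  · -- ascending: keys i - j; neither side reorders (each diagonal already has increasing column)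
    simp only [sparse_grid_diagonals, sparse_grid_diagonals_alt, if_true]
    rw [pvA_loop_eq (fun i j => i - j) g]
    show (pvD1 (fun i j => i - j) g).items
      = ((PySem.List.dedup ((pvCells g).map (fun c => pvKey (fun i j => i - j) c))).foldl
          (fun d k => d.insert k (PySem.List.sorted ((pvCells g).filter (fun c => pvKey (fun i j => i - j) c == k)) (fun c => c.1)))
          PySem.Dict.empty).items
    rw [pvB_items]
    rw [PySem.Dict.items_eq_map_keys _ (pvD1_keys_nodup _ g) []]
    rw [pvD1_keys]
    apply List.map_congr_left
    intro k _
    rw [pvD1_getD, pvSorted_asc]
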